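-- pv_equiv track=rewrite | github.com/YScript/my_research | testpy/figure-supplement.py | box_building
-- ===== SOURCE A (Python) =====
-- def box_building(len):
-- 	"""
-- 		the function make that building a simulation box
-- 		and return the API : lst_atomInfo which has record the information of all of atoms;
-- 	"""
-- 	number_totalAtoms = len**3
-- 	lst_atomInfo = []
-- 	singleAtom = [0,0,0,0]
-- 	for x in range(0,len):
-- 		for y in range(0,len):
-- 			for z in range(0,len):
-- 				singleAtom = [x,y,z,0]
-- 				lst_atomInfo.append(singleAtom)
-- 	return lst_atomInfo
-- ===== SOURCE B (Python) =====
-- def box_building(len):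
--     """Single flat pass: decode each linear index arithmetically instead of three nested loops."""
--     return [[i // (len * len), (i // len) % len, i % len, 0]
--             for i in range(len ** 3)]
-- ===== Notes on version B (the rewrite author's own statement) =====
-- stated objective: alternative
-- what changed: Replaced the three nested loops by one flat loop over range(len**3) that decodes x,y,z from the linear index with // and %.
import Mathlib
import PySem

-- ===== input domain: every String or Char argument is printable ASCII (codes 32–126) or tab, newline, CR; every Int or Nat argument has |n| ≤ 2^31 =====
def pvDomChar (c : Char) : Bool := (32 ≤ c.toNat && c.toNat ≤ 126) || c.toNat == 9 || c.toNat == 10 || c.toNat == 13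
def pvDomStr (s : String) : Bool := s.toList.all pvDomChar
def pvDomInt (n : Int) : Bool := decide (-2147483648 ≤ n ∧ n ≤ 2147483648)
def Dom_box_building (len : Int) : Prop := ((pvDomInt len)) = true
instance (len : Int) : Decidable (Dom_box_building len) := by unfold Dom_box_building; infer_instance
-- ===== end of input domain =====

-- B replaces the three nested loops by one flat pass over range(len**3), decoding x,y,z arithmetically (alternative decomposition, same cost).

-- ===== PORT A =====
def box_building (len : Int) : List (List Int) :=
  (PySem.List.pyRange 0 len 1).foldl (fun acc x =>
    (PySem.List.pyRange 0 len 1).foldl (fun acc y =>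
      (PySem.List.pyRange 0 len 1).foldl (fun acc z =>
        acc ++ [[x, y, z, 0]]) acc) acc) []

-- ===== PORT B =====
def box_building_alt (len : Int) : List (List Int) :=
  (PySem.List.pyRange 0 (len ^ 3) 1).map (fun i =>
    [PySem.Int.floordiv i (len * len),
     PySem.Int.mod (PySem.Int.floordiv i len) len,
     PySem.Int.mod i len, 0])

-- ===== PRECONDITION & SPEC =====
def Spec_box_building (len : Int) (out : List (List Int)) : Prop := out = box_building_alt len
instance (len : Int) (out : List (List Int)) : Decidable (Spec_box_building len out) := by unfold Spec_box_building; infer_instance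

-- ===== CLAIM (what is proved, stated in full; the proofs are below) =====
def Claim_equal_box_building : Prop := ∀ (len : Int), Dom_box_building len → Spec_box_building len (box_building len)

-- ===== LEMMAS AND PROOFS =====

-- flat range of size m*n, mapped, splits into m blocks of n
theorem pv_range_mul {α : Type} (f : Nat → α) (m n : Nat) :
    (List.range (m * n)).map f
      = (List.range m).flatMap (fun x => (List.range n).map (fun z => f (x * n + z))) := by
  induction m with
  | zero => simp
  | succ m ih =>
    have h : (m + 1) * n = m * n + n := by ring
    rw [h, List.range_add, List.map_append, ih, List.range_succ, List.flatMap_append]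
    simp [List.map_map, Function.comp]

theorem pv_decode (N x y z : Nat) (hy : y < N) (hz : z < N) :
    ((x * (N * N) + (y * N + z)) / (N * N) = x
      ∧ (x * (N * N) + (y * N + z)) / N % N = y
      ∧ (x * (N * N) + (y * N + z)) % N = z) := by
  have hN : 0 < N := Nat.lt_of_le_of_lt (Nat.zero_le z) hz
  have hNN : 0 < N * N := Nat.mul_pos hN hN
  refine ⟨?_, ?_, ?_⟩
  · have hr : y * N + z < N * N := by
      calc y * N + z < y * N + N := by omega
        _ = (y + 1) * N := by ring
        _ ≤ N * N := Nat.mul_le_mul_right N hy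
    rw [Nat.mul_comm x (N * N), Nat.mul_add_div hNN, Nat.div_eq_of_lt hr, Nat.add_zero]
  · have h1 : x * (N * N) + (y * N + z) = N * (x * N + y) + z := by ring
    rw [h1, Nat.mul_add_div hN, Nat.div_eq_of_lt hz, Nat.add_zero,
        Nat.mul_add_mod', Nat.mod_eq_of_lt hy]
  · have h1 : x * (N * N) + (y * N + z) = (x * N + y) * N + z := by ring
    rw [h1, Nat.mul_add_mod']
    exact Nat.mod_eq_of_lt hz

-- A's nested folds, flattened to flatMap/map form
theorem pv_tripleFold (R : List Int) :
    R.foldl (fun acc x => R.foldl (fun acc y =>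
        R.foldl (fun acc z => acc ++ [[x, y, z, 0]]) acc) acc) ([] : List (List Int))
      = R.flatMap (fun x => R.flatMap (fun y => R.map (fun z => [x, y, z, 0]))) := by
  have h1 : ∀ (x y : Int) (acc : List (List Int)),
      R.foldl (fun acc z => acc ++ [[x, y, z, 0]]) acc = acc ++ R.map (fun z => [x, y, z, 0]) :=
    fun x y acc => PySem.List.foldl_append_singleton_eq_map ..
  simp only [h1]
  have h2 : ∀ (x : Int) (acc : List (List Int)),
      R.foldl (fun acc y => acc ++ R.map (fun z => [x, y, z, 0])) acc
        = acc ++ R.flatMap (fun y => R.map (fun z => [x, y, z, 0])) :=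
    fun x acc => PySem.List.foldl_append_eq_flatMap ..
  simp only [h2]
  rw [PySem.List.foldl_append_eq_flatMap, List.nil_append]

-- ===== VERDICT helper =====
theorem pv_main (len : Int) : box_building len = box_building_alt len := by
  rcases (by omega : len ≤ 0 ∨ 0 < len) with hle | hpos
  · have h3 : len ^ 3 ≤ 0 := by nlinarith [sq_nonneg len]
    simp [box_building, box_building_alt,
      PySem.List.pyRange_one_eq_nil (a := 0) (b := len) hle,
      PySem.List.pyRange_one_eq_nil (a := 0) (b := len ^ 3) h3]
  · set N : Nat := len.toNat with hNdef
    have hlen : (N : Int) = len := Int.toNat_of_nonneg hpos.le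
    have hcube : len ^ 3 = ((N * (N * N) : Nat) : Int) := by push_cast [hlen]; ring
    have hrange : PySem.List.pyRange 0 len 1 = (List.range N).map (fun k : Nat => (k : Int)) := by
      rw [PySem.List.pyRange_one, show (len - 0).toNat = N by omega]
      exact List.map_congr_left (fun k _ => by omega)
    have hrange3 : PySem.List.pyRange 0 (len ^ 3) 1
        = (List.range (N * (N * N))).map (fun k : Nat => (k : Int)) := by
      rw [PySem.List.pyRange_one, hcube, show (((N * (N * N) : Nat) : Int) - 0).toNat = N * (N * N) by omega]
      exact List.map_congr_left (fun k _ => by omega)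
    unfold box_building box_building_alt
    rw [hrange, hrange3, pv_tripleFold]
    rw [List.flatMap_map, List.map_map, pv_range_mul]
    apply List.flatMap_congr
    intro x hx
    rw [List.flatMap_map, pv_range_mul]
    apply List.flatMap_congr
    intro y hy
    have hyN := List.mem_range.mp hy
    rw [List.map_map]
    apply List.map_congr_left
    intro z hz
    have hzN := List.mem_range.mp hz
    obtain ⟨h1, h2, h3⟩ := pv_decode N x y z hyN hzN
    simp only [Function.comp]
    rw [← hlen]
    have hll : (N : Int) * N = ((N * N : Nat) : Int) := by push_cast; ring
    rw [hll]
    simp only [PySem.Int.floordiv_natCast, PySem.Int.mod_natCast, h1, h2, h3]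

-- ===== VERDICT (by name: the statement is the Claim_ definition above) =====
theorem box_building_spec : Claim_equal_box_building := by
  intro len _
  unfold Spec_box_building
  exact pv_main len
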